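-- pv_equiv track=rewrite | github.com/NKofod/Valgaften | render_map.py | votes_district
-- ===== SOURCE A (Python) =====
-- def votes_district(results,parties):
--         red = 0
--         blue = 0
--         if results == {}:
--             return 0,0,0
--         for i in results:
--             if i == "":
--                 continue
--             if parties[i]['Wing'] == "Red":
--                 red += int(results[i])
--             else:
--                 blue += int(results[i])
--         total = red + blue
--         return red, blue, total
-- ===== SOURCE B (Python) =====
-- def votes_district(results, parties):
--     red = sum(int(results[i]) for i in results
--               if i != "" and parties[i]["Wing"] == "Red")
--     blue = sum(int(results[i]) for i in results
--                if i != "" and parties[i]["Wing"] != "Red")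
--     return red, blue, red + blue
-- ===== Notes on version B (the rewrite author's own statement) =====
-- stated objective: simpler
-- what changed: Replaces the single accumulator loop with empty-dict guard and continue/else branching by two independent sum() generator expressions (one per wing) and drops the redundant empty-dict early return.
import Mathlib
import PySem

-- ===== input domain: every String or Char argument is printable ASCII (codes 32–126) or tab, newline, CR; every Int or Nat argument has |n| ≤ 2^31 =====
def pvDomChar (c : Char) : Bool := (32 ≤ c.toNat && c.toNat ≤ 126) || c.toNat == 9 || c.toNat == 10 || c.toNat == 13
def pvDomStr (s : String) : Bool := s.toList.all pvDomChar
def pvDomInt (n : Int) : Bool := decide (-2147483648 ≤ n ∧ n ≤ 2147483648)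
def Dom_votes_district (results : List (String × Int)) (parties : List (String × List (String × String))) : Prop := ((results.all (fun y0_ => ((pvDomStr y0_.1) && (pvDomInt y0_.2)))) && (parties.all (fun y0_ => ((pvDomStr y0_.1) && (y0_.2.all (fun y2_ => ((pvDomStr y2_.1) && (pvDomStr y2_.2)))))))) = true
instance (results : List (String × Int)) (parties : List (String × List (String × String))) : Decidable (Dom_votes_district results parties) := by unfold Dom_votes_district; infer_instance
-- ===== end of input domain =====

-- B replaces A's single accumulator loop (with empty-dict guard and continue/else
-- branching) by two independent per-wing sums; the empty-dict early return is dropped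
-- as redundant.

-- shared dict primitive: first-match association-list lookup = Python d[k] (none = KeyError)
def pvGetKV {ν : Type} (d : List (String × ν)) (k : String) : Option ν :=
  (PySem.Dict.mk d).get? k

-- the wing string of key i: parties[i]['Wing']; "" stands for the KeyError case,
-- which Pre_votes_district excludes (Python A and B both raise there)
def pvWing (parties : List (String × List (String × String))) (i : String) : String :=
  (pvGetKV ((pvGetKV parties i).getD []) "Wing").getD ""

-- ===== PORT A =====
-- the loop: for i in results: skip "", branch on parties[i]['Wing'], add results[i]
def votesLoopA (results : List (String × Int)) (parties : List (String × List (String × String))) : Int × Int → List (String × Int) → Int × Int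
  | (red, blue), [] => (red, blue)
  | (red, blue), (i, _) :: rest =>
    if i = "" then votesLoopA results parties (red, blue) rest
    else if pvWing parties i = "Red" then
      votesLoopA results parties (red + (pvGetKV results i).getD 0, blue) rest
    else
      votesLoopA results parties (red, blue + (pvGetKV results i).getD 0) rest

def votes_district (results : List (String × Int)) (parties : List (String × List (String × String))) : Int × Int × Int :=
  if results = [] then (0, 0, 0)
  else
    let rb := votesLoopA results parties (0, 0) results
    (rb.1, rb.2, rb.1 + rb.2)

-- ===== PORT B =====
-- red = sum(int(results[i]) for i in results if i != "" and parties[i]['Wing'] == "Red")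
def sumRed (results : List (String × Int)) (parties : List (String × List (String × String))) : Int :=
  (results.filterMap (fun p =>
    if p.1 ≠ "" ∧ pvWing parties p.1 = "Red" then some ((pvGetKV results p.1).getD 0) else none)).sum

-- blue = sum(int(results[i]) for i in results if i != "" and parties[i]['Wing'] != "Red")
def sumBlue (results : List (String × Int)) (parties : List (String × List (String × String))) : Int :=
  (results.filterMap (fun p =>
    if p.1 ≠ "" ∧ pvWing parties p.1 ≠ "Red" then some ((pvGetKV results p.1).getD 0) else none)).sum

def votes_district_alt (results : List (String × Int)) (parties : List (String × List (String × String))) : Int × Int × Int :=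
  let red := sumRed results parties
  let blue := sumBlue results parties
  (red, blue, red + blue)

-- ===== PRECONDITION & SPEC =====
-- Pre_ excludes exactly the inputs where Python raises KeyError: some non-empty key of
-- results is missing from parties, or its party dict has no 'Wing' entry.
def Pre_votes_district (results : List (String × Int)) (parties : List (String × List (String × String))) : Prop :=
  ∀ p ∈ results, p.1 ≠ "" →
    ((pvGetKV parties p.1).bind (fun d => pvGetKV d "Wing")).isSome = true
instance (results : List (String × Int)) (parties : List (String × List (String × String))) : Decidable (Pre_votes_district results parties) := by unfold Pre_votes_district; infer_instance
def pvWitness_votes_district : (List (String × Int)) × (List (String × List (String × String))) :=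
  ([("a", 3), ("b", 4)], [("a", [("Wing", "Red")]), ("b", [("Wing", "Blue")])])

def Spec_votes_district (results : List (String × Int)) (parties : List (String × List (String × String))) (out : Int × Int × Int) : Prop := out = votes_district_alt results parties
instance (results : List (String × Int)) (parties : List (String × List (String × String))) (out : Int × Int × Int) : Decidable (Spec_votes_district results parties out) := by unfold Spec_votes_district; infer_instance

-- ===== CLAIM (what is proved, stated in full; the proofs are below) =====
def Claim_equal_votes_district : Prop := ∀ (results : List (String × Int)) (parties : List (String × List (String × String))), Dom_votes_district results parties → Pre_votes_district results parties → Spec_votes_district results parties (votes_district results parties)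

-- ===== LEMMAS AND PROOFS =====

-- loop invariant: A's fold from (r,b) over a key list l adds B's two sums over l
theorem votesLoopA_eq (results : List (String × Int)) (parties : List (String × List (String × String)))
    (l : List (String × Int)) (r b : Int) :
    votesLoopA results parties (r, b) l =
      (r + (l.filterMap (fun p =>
              if p.1 ≠ "" ∧ pvWing parties p.1 = "Red" then some ((pvGetKV results p.1).getD 0) else none)).sum,
       b + (l.filterMap (fun p =>
              if p.1 ≠ "" ∧ pvWing parties p.1 ≠ "Red" then some ((pvGetKV results p.1).getD 0) else none)).sum) := by
  induction l generalizing r b with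
  | nil => simp [votesLoopA]
  | cons hd tl ih =>
    obtain ⟨i, v⟩ := hd
    by_cases hi : i = ""
    · simp [votesLoopA, hi, ih]
    · by_cases hw : pvWing parties i = "Red"
      · simp [votesLoopA, hi, hw, ih]; ring
      · simp [votesLoopA, hi, hw, ih]; ring

-- ===== VERDICT (by name: the statement is the Claim_ definition above) =====
theorem votes_district_spec : Claim_equal_votes_district := by
  intro results parties _ _
  unfold Spec_votes_district votes_district votes_district_alt sumRed sumBlue
  by_cases h : results = []
  · simp [h]
  · simp [h, votesLoopA_eq]
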